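-- pv_equiv track=rewrite | github.com/BMProjects/Microlens_DF | scripts/build_tile_dataset.py | iter_tiles_v2
-- ===== SOURCE A (Python) =====
-- TILE_SIZE = 640
--
-- OVERLAP = 80
--
-- STRIDE = TILE_SIZE - OVERLAP
--
-- def iter_tiles_v2(img_h: int, img_w: int):
--     """生成覆盖全图的 tile 起始坐标（末尾 tile 向前对齐）."""
--     import math
--     nx = max(1, math.ceil((img_w - OVERLAP) / STRIDE))
--     ny = max(1, math.ceil((img_h - OVERLAP) / STRIDE))
--     for iy in range(ny):
--         y0 = min(iy * STRIDE, img_h - TILE_SIZE)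
--         for ix in range(nx):
--             x0 = min(ix * STRIDE, img_w - TILE_SIZE)
--             yield y0, x0
-- ===== SOURCE B (Python) =====
-- TILE_SIZE = 640
--
-- OVERLAP = 80
--
-- STRIDE = TILE_SIZE - OVERLAP
--
-- def iter_tiles_v2(img_h: int, img_w: int):
--     """Coverage walk: step each axis by STRIDE until the tile reaches the edge.
--
--     No tile counts and no ceiling division are computed: the walk emits a start,
--     clamps it to the edge, and stops exactly when the tile at the current
--     (unclamped) offset already covers the remaining extent."""
--     y = 0
--     while True:
--         y0 = min(y, img_h - TILE_SIZE)
--         x = 0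
--         while True:
--             yield y0, min(x, img_w - TILE_SIZE)
--             if x + TILE_SIZE >= img_w:
--                 break
--             x += STRIDE
--         if y + TILE_SIZE >= img_h:
--             break
--         y += STRIDE
-- ===== Notes on version B (the rewrite author's own statement) =====
-- stated objective: alternative
-- what changed: B replaces A's ceiling-division tile counts and indexed range loops by a division-free coverage walk: each axis steps by STRIDE, clamping to the edge, and stops exactly when the current tile reaches the image boundary.
import Mathlib
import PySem

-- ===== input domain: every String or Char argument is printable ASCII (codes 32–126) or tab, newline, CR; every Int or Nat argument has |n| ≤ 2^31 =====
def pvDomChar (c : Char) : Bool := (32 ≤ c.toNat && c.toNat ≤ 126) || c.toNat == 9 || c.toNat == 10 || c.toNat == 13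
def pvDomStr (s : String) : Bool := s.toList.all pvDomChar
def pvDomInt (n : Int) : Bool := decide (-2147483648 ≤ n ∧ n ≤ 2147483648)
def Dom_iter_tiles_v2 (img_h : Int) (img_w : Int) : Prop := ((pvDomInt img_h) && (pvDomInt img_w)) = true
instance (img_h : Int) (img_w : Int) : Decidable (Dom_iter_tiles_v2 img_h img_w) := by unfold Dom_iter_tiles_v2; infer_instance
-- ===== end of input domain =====

-- B replaces A's count computation (math.ceil division, then indexed ranges) by a
-- coverage walk: each axis steps by STRIDE, clamping to the edge, and stops exactly
-- when the current tile reaches the image boundary — no division at all.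
-- math.ceil((n-80)/560) in A is ported as the exact integer ceiling
-- -((-(n-80)) // 560): for |n| ≤ 2^31 the float quotient's error is far below the
-- 1/560 gap to the nearest integer, so the float ceil is exact on Dom.
-- B's while loops are ported as fuel recursion; the fuel (the remaining extent,
-- which bounds the remaining steps) is a totality guard only and never runs out.

-- ===== PORT A =====
def iter_tiles_v2 (img_h : Int) (img_w : Int) : List (Int × Int) :=
  let nx := max 1 (-(PySem.Int.floordiv (-(img_w - 80)) 560))
  let ny := max 1 (-(PySem.Int.floordiv (-(img_h - 80)) 560))
  (PySem.List.pyRange 0 ny 1).foldl (fun acc iy =>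
    let y0 := min (iy * 560) (img_h - 640)
    (PySem.List.pyRange 0 nx 1).foldl (fun acc2 ix =>
      let x0 := min (ix * 560) (img_w - 640)
      acc2 ++ [(y0, x0)]) acc) []

-- ===== PORT B =====
-- inner while loop of Source B: emit (y0, clamped x), stop when x + 640 ≥ img_w
def pvRowGo (img_w : Int) (y0 : Int) : Nat → Int → List (Int × Int)
  | fuel, x =>
    (y0, min x (img_w - 640)) ::
      (if img_w ≤ x + 640 then []
       else match fuel with
         | 0 => []                        -- unreachable: fuel bounds the remaining steps
         | f + 1 => pvRowGo img_w y0 f (x + 560))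

-- outer while loop of Source B: one row per y, stop when y + 640 ≥ img_h
def pvTilesGo (img_h : Int) (img_w : Int) : Nat → Int → List (Int × Int)
  | fuel, y =>
    pvRowGo img_w (min y (img_h - 640)) ((img_w - 640).toNat) 0 ++
      (if img_h ≤ y + 640 then []
       else match fuel with
         | 0 => []                        -- unreachable: fuel bounds the remaining steps
         | f + 1 => pvTilesGo img_h img_w f (y + 560))

def iter_tiles_v2_alt (img_h : Int) (img_w : Int) : List (Int × Int) :=
  pvTilesGo img_h img_w ((img_h - 640).toNat) 0

-- ===== PRECONDITION & SPEC =====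
def Spec_iter_tiles_v2 (img_h : Int) (img_w : Int) (out : List (Int × Int)) : Prop := out = iter_tiles_v2_alt img_h img_w
instance (img_h : Int) (img_w : Int) (out : List (Int × Int)) : Decidable (Spec_iter_tiles_v2 img_h img_w out) := by unfold Spec_iter_tiles_v2; infer_instance

-- ===== CLAIM =====
def Claim_equal_iter_tiles_v2 : Prop := ∀ (img_h : Int) (img_w : Int), Dom_iter_tiles_v2 img_h img_w → Spec_iter_tiles_v2 img_h img_w (iter_tiles_v2 img_h img_w)

-- ===== LEMMAS AND PROOFS =====

-- the tile count A computes for a dimension d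
def pvN (d : Int) : Int := max 1 (-(PySem.Int.floordiv (-(d - 80)) 560))

theorem pvN_pos (d : Int) : 1 ≤ pvN d := le_max_left _ _

-- the stop condition of B's walk at step i characterises "i is the last index of A's range"
theorem pv_stop_iff (d : Int) (i : Int) (h0 : 0 ≤ i) (hi : i < pvN d) :
    (d ≤ i * 560 + 640) ↔ i + 1 = pvN d := by
  have hq := PySem.Int.floordiv_mul_add_mod (-(d - 80)) 560
  have hr0 := PySem.Int.mod_nonneg (-(d - 80)) (b := 560) (by omega)
  have hr1 := PySem.Int.mod_lt (-(d - 80)) (b := 560) (by omega)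
  unfold pvN at hi ⊢
  omega

theorem pv_foldl_snoc {α β : Type} (f : α → β) (l : List α) (acc : List β) :
    l.foldl (fun a x => a ++ [f x]) acc = acc ++ l.map f := by
  induction l generalizing acc with
  | nil => simp
  | cons x t ih => simp [List.foldl, ih]

theorem pv_nested_foldl_eq_flatMap (hs ws : List Int) (img_h img_w : Int)
    (acc : List (Int × Int)) :
    hs.foldl (fun acc iy =>
      let y0 := min (iy * 560) (img_h - 640)
      ws.foldl (fun acc2 ix =>
        let x0 := min (ix * 560) (img_w - 640)
        acc2 ++ [(y0, x0)]) acc) acc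
    = acc ++ hs.flatMap (fun iy =>
        ws.map (fun ix => (min (iy * 560) (img_h - 640), min (ix * 560) (img_w - 640)))) := by
  induction hs generalizing acc with
  | nil => simp
  | cons y t ih =>
      simp only [List.foldl, List.flatMap_cons]
      rw [pv_foldl_snoc (fun ix => (min (y * 560) (img_h - 640), min (ix * 560) (img_w - 640))) ws acc,
          ih, List.append_assoc]

-- B's inner walk starting at offset i*560 equals A's map over the tail range [i, nx)
theorem pvRowGo_eq (img_w y0 : Int) :
    ∀ (fuel : Nat) (i : Int), 0 ≤ i → i < pvN img_w →
      (img_w - 640 - i * 560).toNat ≤ fuel →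
      pvRowGo img_w y0 fuel (i * 560) =
        (PySem.List.pyRange i (pvN img_w) 1).map
          (fun ix => (y0, min (ix * 560) (img_w - 640))) := by
  intro fuel
  induction fuel with
  | zero =>
      intro i h0 hi hf
      have hstop : img_w ≤ i * 560 + 640 := by omega
      have hlast := (pv_stop_iff img_w i h0 hi).mp hstop
      have hnil : PySem.List.pyRange (i + 1) (pvN img_w) 1 = [] :=
        PySem.List.pyRange_one_eq_nil (by omega)
      rw [pvRowGo, if_pos hstop, PySem.List.pyRange_one_cons hi, hnil]
      simp
  | succ f ih =>
      intro i h0 hi hf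
      rw [pvRowGo, PySem.List.pyRange_one_cons hi, List.map_cons]
      by_cases hstop : img_w ≤ i * 560 + 640
      · have hlast := (pv_stop_iff img_w i h0 hi).mp hstop
        have hnil : PySem.List.pyRange (i + 1) (pvN img_w) 1 = [] :=
          PySem.List.pyRange_one_eq_nil (by omega)
        rw [if_pos hstop, hnil]
        simp
      · have hnext : i + 1 < pvN img_w := by
          have := pv_stop_iff img_w i h0 hi
          omega
        rw [if_neg hstop]
        have := ih (i + 1) (by omega) hnext (by omega)
        rw [show (i + 1) * 560 = i * 560 + 560 by ring] at this
        rw [this]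

-- B's outer walk starting at offset i*560 equals A's flatMap over the tail range [i, ny)
theorem pvTilesGo_eq (img_h img_w : Int) :
    ∀ (fuel : Nat) (i : Int), 0 ≤ i → i < pvN img_h →
      (img_h - 640 - i * 560).toNat ≤ fuel →
      pvTilesGo img_h img_w fuel (i * 560) =
        (PySem.List.pyRange i (pvN img_h) 1).flatMap
          (fun iy => (PySem.List.pyRange 0 (pvN img_w) 1).map
            (fun ix => (min (iy * 560) (img_h - 640), min (ix * 560) (img_w - 640)))) := by
  intro fuel
  have hrow : ∀ y0 : Int, pvRowGo img_w y0 ((img_w - 640).toNat) 0 =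
      (PySem.List.pyRange 0 (pvN img_w) 1).map
        (fun ix => (y0, min (ix * 560) (img_w - 640))) := by
    intro y0
    have := pvRowGo_eq img_w y0 ((img_w - 640).toNat) 0
      (le_refl 0) (by have := pvN_pos img_w; omega) (by omega)
    rwa [show (0 : Int) * 560 = 0 by ring] at this
  induction fuel with
  | zero =>
      intro i h0 hi hf
      have hstop : img_h ≤ i * 560 + 640 := by omega
      have hlast := (pv_stop_iff img_h i h0 hi).mp hstop
      have hnil : PySem.List.pyRange (i + 1) (pvN img_h) 1 = [] :=
        PySem.List.pyRange_one_eq_nil (by omega)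
      rw [pvTilesGo, if_pos hstop, PySem.List.pyRange_one_cons hi, List.flatMap_cons, hnil, hrow]
      simp
  | succ f ih =>
      intro i h0 hi hf
      rw [pvTilesGo, PySem.List.pyRange_one_cons hi, List.flatMap_cons, hrow]
      by_cases hstop : img_h ≤ i * 560 + 640
      · have hlast := (pv_stop_iff img_h i h0 hi).mp hstop
        have hnil : PySem.List.pyRange (i + 1) (pvN img_h) 1 = [] :=
          PySem.List.pyRange_one_eq_nil (by omega)
        rw [if_pos hstop, hnil]
        simp
      · have hnext : i + 1 < pvN img_h := by
          have := pv_stop_iff img_h i h0 hi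
          omega
        rw [if_neg hstop]
        have := ih (i + 1) (by omega) hnext (by omega)
        rw [show (i + 1) * 560 = i * 560 + 560 by ring] at this
        rw [this]

-- ===== VERDICT =====
theorem iter_tiles_v2_spec : Claim_equal_iter_tiles_v2 := by
  intro img_h img_w _
  show _ = _
  unfold iter_tiles_v2 iter_tiles_v2_alt
  rw [pv_nested_foldl_eq_flatMap, List.nil_append]
  have := pvTilesGo_eq img_h img_w ((img_h - 640).toNat) 0
    (le_refl 0) (by have := pvN_pos img_h; omega) (by omega)
  rw [show (0 : Int) * 560 = 0 by ring] at this
  rw [this]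
  rfl
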